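-- pv_equiv track=rewrite | github.com/junebug-junie/Orion-Sapienform | services/orion-hub/scripts/websocket_handler.py | _build_prompt_with_history
-- ===== SOURCE A (Python) =====
-- from typing import Any, Dict, List, Optional
--
-- def _build_prompt_with_history(
--     history: List[Dict[str, Any]],
--     user_text: str,
--     turns: int,
--     max_chars: int,
-- ) -> str:
--     """Build a single prompt string that includes the last N turns as plain text.
--
--     This is intentionally *Hub-side only* and does not require any schema changes.
--
--     Notes:
--       - "turns" means userassistant pairs; we keep up to 2*turns messages.
--       - We exclude system messages (the backend already has its own system prompt).
--     """
--     msgs = [m for m in history if m.get("role") in ("user", "assistant")]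
--
--     # "turns" = userassistant pairs -> 2*turns messages
--     tail = msgs[-2 * max(0, int(turns)) :] if turns else []
--
--     lines: List[str] = []
--     for m in tail:
--         role = m.get("role")
--         content = (m.get("content") or "").strip()
--         if not content:
--             continue
--         speaker = "You" if role == "user" else "Orion"
--         # Avoid accidental mega-prompts if something goes sideways
--         if len(content) > 6000:
--             content = content[:6000].rstrip() + " …"
--
--         lines.append(f"{speaker}: {content}")
--
--     base_user = (user_text or "").strip()
--     if not lines:
--         return base_user
--
--     header = "Conversation context (most recent last):"
--
--     def _compose(ls: List[str]) -> str:
--         ctx = "\n".join(ls).strip()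
--         return f"{header}\n{ctx}\n\nYou: {base_user}\nOrion:"
--
--     prompt = _compose(lines)
--
--     # Trim oldest context lines until we fit under max_chars
--     if max_chars and max_chars > 0:
--         while len(prompt) > max_chars and lines:
--             lines.pop(0)
--             prompt = _compose(lines)
--
--     return prompt
-- ===== SOURCE B (Python) =====
-- from typing import Any, Dict, List, Optional
--
-- def _line_of(m: Dict[str, Any]) -> Optional[str]:
--     content = (m.get("content") or "").strip()
--     if not content:
--         return None
--     if len(content) > 6000:
--         content = content[:6000].rstrip() + " …"
--     speaker = "You" if m.get("role") == "user" else "Orion"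
--     return f"{speaker}: {content}"
--
-- def _build_prompt_with_history(
--     history: List[Dict[str, Any]],
--     user_text: str,
--     turns: int,
--     max_chars: int,
-- ) -> str:
--     msgs = [m for m in history if m.get("role") in ("user", "assistant")]
--     tail = msgs[-2 * max(0, int(turns)):] if turns else []
--
--     lines = [ln for ln in map(_line_of, tail) if ln is not None]
--
--     base_user = (user_text or "").strip()
--     if not lines:
--         return base_user
--
--     header = "Conversation context (most recent last):"
--     # Fixed overhead of the composed prompt outside the context lines.
--     fixed = len(header) + 1 + len("\n\nYou: ") + len(base_user) + len("\nOrion:")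
--
--     if max_chars > 0:
--         # One pass over the line lengths instead of recomposing per drop.
--         lens = [len(ln) for ln in lines]
--         n = len(lines)
--         cur = fixed + sum(lens) + n - 1
--         i = 0
--         while cur > max_chars and i < n:
--             cur -= lens[i] + (1 if i < n - 1 else 0)
--             i += 1
--         lines = lines[i:]
--
--     ctx = "\n".join(lines)
--     return f"{header}\n{ctx}\n\nYou: {base_user}\nOrion:"
-- ===== Notes on version B (the rewrite author's own statement) =====
-- stated objective: alternative
-- what changed: B replaces A's trim loop, which re-joins and re-measures the whole prompt after every dropped line, by one arithmetic pass over precomputed line lengths that finds the drop count, composing the prompt exactly once; lines are built via an Optional-returning helper instead of an append loop.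
import Mathlib
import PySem

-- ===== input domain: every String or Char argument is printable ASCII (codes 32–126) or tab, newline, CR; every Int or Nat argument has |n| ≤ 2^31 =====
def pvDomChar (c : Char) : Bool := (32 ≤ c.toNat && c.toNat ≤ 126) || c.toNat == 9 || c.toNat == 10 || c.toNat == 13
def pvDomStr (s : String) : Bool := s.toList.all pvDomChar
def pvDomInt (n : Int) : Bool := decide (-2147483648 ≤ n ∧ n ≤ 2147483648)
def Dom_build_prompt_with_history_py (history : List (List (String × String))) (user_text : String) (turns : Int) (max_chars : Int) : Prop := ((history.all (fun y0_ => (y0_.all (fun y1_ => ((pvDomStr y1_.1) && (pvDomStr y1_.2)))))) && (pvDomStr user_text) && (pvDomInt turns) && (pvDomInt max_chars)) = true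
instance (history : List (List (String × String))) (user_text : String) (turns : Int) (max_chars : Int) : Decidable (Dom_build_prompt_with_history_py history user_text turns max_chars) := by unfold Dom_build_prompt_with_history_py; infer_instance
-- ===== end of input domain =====

-- B trims the context by a single arithmetic pass over precomputed line lengths and composes
-- the prompt once, instead of A's recompose-per-dropped-line loop (objective: alternative).

-- ===== PORT A =====
-- shared with port B: dict.get on the association list, and the role filter (same line in both Pythons)
def pvDget (m : List (String × String)) (k : String) : Option String :=
  (m.find? (fun p => p.1 == k)).map (fun p => p.2)

def pvIsUA (m : List (String × String)) : Bool :=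
  pvDget m "role" == some "user" || pvDget m "role" == some "assistant"

def pvHeader : List Char := "Conversation context (most recent last):".toList

-- the body of A's `for m in tail:` loop
def pvStepA (acc : List (List Char)) (m : List (String × String)) : List (List Char) :=
  let role := pvDget m "role"
  let content := PySem.Chars.strip (((pvDget m "content").getD "").toList)
  if content = [] then acc
  else
    let speaker := if role == some "user" then "You".toList else "Orion".toList
    let content := if 6000 < content.length then PySem.Chars.rstrip (content.take 6000) ++ " …".toList else content
    acc ++ [speaker ++ ": ".toList ++ content]

-- A's `_compose`
def pvComposeA (bu : List Char) (ls : List (List Char)) : List Char :=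
  pvHeader ++ '\n' :: (PySem.Chars.strip (PySem.Chars.join ['\n'] ls) ++ ("\n\nYou: ".toList ++ bu ++ "\nOrion:".toList))

-- A's `while len(prompt) > max_chars and lines:` pop-and-recompose loop
def pvTrimA (bu : List Char) (mc : Int) : List (List Char) → List Char
  | [] => pvComposeA bu []
  | l :: ls =>
    if mc < ((pvComposeA bu (l :: ls)).length : Int) then pvTrimA bu mc ls
    else pvComposeA bu (l :: ls)

def build_prompt_with_history_py (history : List (List (String × String))) (user_text : String) (turns : Int) (max_chars : Int) : String :=
  let msgs := history.filter pvIsUA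
  let tail := if turns ≠ 0 then PySem.List.slice msgs (some (-(2 * max 0 turns))) none else []
  let lines := tail.foldl pvStepA []
  let base_user := PySem.Chars.strip user_text.toList
  if lines = [] then String.ofList base_user
  else
    let prompt := pvComposeA base_user lines
    if max_chars ≠ 0 ∧ 0 < max_chars then String.ofList (pvTrimA base_user max_chars lines)
    else String.ofList prompt

-- ===== PORT B =====
-- B's `_line_of`
def pvLineOf (m : List (String × String)) : Option (List Char) :=
  let content := PySem.Chars.strip (((pvDget m "content").getD "").toList)
  if content = [] then none
  else
    let content := if 6000 < content.length then PySem.Chars.rstrip (content.take 6000) ++ " …".toList else content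
    let speaker := if pvDget m "role" == some "user" then "You".toList else "Orion".toList
    some (speaker ++ ": ".toList ++ content)

-- B's arithmetic trim loop over the line lengths (no recomposition)
def pvTrimB (mc : Int) : Int → List (List Char) → List (List Char)
  | _, [] => []
  | cur, l :: ls =>
    if mc < cur then pvTrimB mc (cur - ((l.length : Int) + (if ls = [] then 0 else 1))) ls
    else l :: ls

-- B's final f-string (no strip: B's lines carry no surrounding whitespace)
def pvComposeB (bu : List Char) (ls : List (List Char)) : List Char :=
  pvHeader ++ '\n' :: (PySem.Chars.join ['\n'] ls ++ ("\n\nYou: ".toList ++ bu ++ "\nOrion:".toList))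

def build_prompt_with_history_py_alt (history : List (List (String × String))) (user_text : String) (turns : Int) (max_chars : Int) : String :=
  let msgs := history.filter pvIsUA
  let tail := if turns ≠ 0 then PySem.List.slice msgs (some (-(2 * max 0 turns))) none else []
  let lines := tail.filterMap pvLineOf
  let base_user := PySem.Chars.strip user_text.toList
  if lines = [] then String.ofList base_user
  else
    let fixed : Int := (pvHeader.length : Int) + 1 + ("\n\nYou: ".toList.length : Int) + (base_user.length : Int) + ("\nOrion:".toList.length : Int)
    let lines' :=
      if 0 < max_chars then
        let cur : Int := fixed + (((lines.map (fun l => l.length)).sum : Nat) : Int) + (lines.length : Int) - 1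
        pvTrimB max_chars cur lines
      else lines
    String.ofList (pvComposeB base_user lines')

-- ===== PRECONDITION & SPEC =====
def Spec_build_prompt_with_history_py (history : List (List (String × String))) (user_text : String) (turns : Int) (max_chars : Int) (out : String) : Prop := out = build_prompt_with_history_py_alt history user_text turns max_chars
instance (history : List (List (String × String))) (user_text : String) (turns : Int) (max_chars : Int) (out : String) : Decidable (Spec_build_prompt_with_history_py history user_text turns max_chars out) := by unfold Spec_build_prompt_with_history_py; infer_instance

-- ===== CLAIM (what is proved, stated in full; the proofs are below) =====
def Claim_equal_build_prompt_with_history_py : Prop := ∀ (history : List (List (String × String))) (user_text : String) (turns : Int) (max_chars : Int), Dom_build_prompt_with_history_py history user_text turns max_chars → Spec_build_prompt_with_history_py history user_text turns max_chars (build_prompt_with_history_py history user_text turns max_chars)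

-- ===== LEMMAS AND PROOFS =====

-- a line with a non-whitespace first and last character
def pvGood (l : List Char) : Prop :=
  ∃ c d, l.head? = some c ∧ PySem.Chars.isspace c = false ∧ l.getLast? = some d ∧ PySem.Chars.isspace d = false

theorem pvStepA_eq (acc : List (List Char)) (m : List (String × String)) :
    pvStepA acc m = match pvLineOf m with | none => acc | some l => acc ++ [l] := by
  simp only [pvStepA, pvLineOf]
  split_ifs <;> rfl

theorem pvFoldA_eq (tail : List (List (String × String))) :
    ∀ acc, tail.foldl pvStepA acc = acc ++ tail.filterMap pvLineOf := by
  induction tail with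
  | nil => simp
  | cons m t ih =>
    intro acc
    simp only [List.foldl_cons, List.filterMap_cons, pvStepA_eq]
    cases h : pvLineOf m <;> simp [ih]

theorem pvDropWhile_head_false {p : Char → Bool} {l : List Char} {c : Char}
    (hc : l.head? = some c) (hp : p c = false) : l.dropWhile p = l := by
  cases l with
  | nil => simp at hc
  | cons a t =>
    simp at hc
    subst hc
    simp [hp]

theorem pvStrip_noop {l : List Char} (h : pvGood l) : PySem.Chars.strip l = l := by
  obtain ⟨c, d, hc, hcs, hd, hds⟩ := h
  have h1 : PySem.Chars.lstrip l = l := pvDropWhile_head_false hc hcs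
  have h2 : PySem.Chars.rstrip l = l := by
    have : l.reverse.head? = some d := by rw [List.head?_reverse]; exact hd
    simp only [PySem.Chars.rstrip, pvDropWhile_head_false this hds, List.reverse_reverse]
  simp only [PySem.Chars.strip, h1, h2]

theorem pvDropWhile_head (p : Char → Bool) (l : List Char) :
    l.dropWhile p = [] ∨ ∃ c, (l.dropWhile p).head? = some c ∧ p c = false := by
  induction l with
  | nil => left; rfl
  | cons a t ih =>
    by_cases h : p a
    · simpa [List.dropWhile_cons, h] using ih
    · right; exact ⟨a, by simp [h], by simpa using h⟩

theorem pvRstrip_last {cs : List Char} (h : PySem.Chars.rstrip cs ≠ []) :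
    ∃ d, (PySem.Chars.rstrip cs).getLast? = some d ∧ PySem.Chars.isspace d = false := by
  rcases pvDropWhile_head PySem.Chars.isspace cs.reverse with h0 | ⟨d, hd, hds⟩
  · exact absurd (by simp [PySem.Chars.rstrip, h0]) h
  · exact ⟨d, by simpa [PySem.Chars.rstrip, List.getLast?_reverse] using hd, hds⟩

theorem pvLineOf_good {m : List (String × String)} {l : List Char}
    (h : pvLineOf m = some l) : pvGood l := by
  simp only [pvLineOf] at h
  by_cases hne : PySem.Chars.strip (((pvDget m "content").getD "").toList) = []
  · rw [if_pos hne] at h; cases h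
  · rw [if_neg hne] at h
    replace h := Option.some.inj h
    subst h
    set c0 := PySem.Chars.strip (((pvDget m "content").getD "").toList) with hc0
    have hlast : ∃ d, ((if 6000 < c0.length then PySem.Chars.rstrip (c0.take 6000) ++ " …".toList else c0)).getLast? = some d ∧
        PySem.Chars.isspace d = false ∧
        (if 6000 < c0.length then PySem.Chars.rstrip (c0.take 6000) ++ " …".toList else c0) ≠ [] := by
      split_ifs with htr
      · refine ⟨'…', ?_, by decide, by simp⟩
        rw [List.getLast?_append_of_ne_nil _ (by simp : (" …".toList : List Char) ≠ [])]
        decide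
      · obtain ⟨d, hd, hds⟩ := pvRstrip_last (cs := PySem.Chars.lstrip (((pvDget m "content").getD "").toList)) hne
        exact ⟨d, hd, hds, hne⟩
    obtain ⟨d, hd, hds, hne'⟩ := hlast
    refine ⟨(if pvDget m "role" == some "user" then "You".toList else "Orion".toList).headD 'Y', d, ?_, ?_, ?_, hds⟩
    · rw [List.append_assoc, List.head?_append_of_ne_nil]
      · split_ifs <;> rfl
      · split_ifs <;> simp
    · split_ifs <;> decide
    · rw [List.append_assoc, List.getLast?_append_of_ne_nil, List.getLast?_append_of_ne_nil _ hne']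
      · exact hd
      · intro hcon
        exact hne' (List.append_eq_nil_iff.mp hcon).2

theorem pvJoin_good : ∀ (ls : List (List Char)), ls ≠ [] → (∀ l ∈ ls, pvGood l) →
    pvGood (PySem.Chars.join ['\n'] ls) := by
  intro ls
  induction ls with
  | nil => intro h; exact absurd rfl h
  | cons l ls ih =>
    intro _ hall
    have hl : pvGood l := hall l (by simp)
    cases ls with
    | nil => simpa [PySem.Chars.join_singleton] using hl
    | cons l' rest =>
      have hj : pvGood (PySem.Chars.join ['\n'] (l' :: rest)) :=
        ih (by simp) (fun x hx => hall x (by simp [hx]))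
      obtain ⟨c, d, hc, hcs, hd, hds⟩ := hl
      obtain ⟨c', d', hc', hcs', hd', hds'⟩ := hj
      rw [PySem.Chars.join_cons_cons]
      have hlne : l ≠ [] := by intro h; subst h; simp at hc
      have hjne : PySem.Chars.join ['\n'] (l' :: rest) ≠ [] := by
        intro h; rw [h] at hc'; simp at hc'
      refine ⟨c, d', ?_, hcs, ?_, hds'⟩
      · rw [List.append_assoc, List.head?_append_of_ne_nil _ hlne]; exact hc
      · have h1 : (['\n'] ++ PySem.Chars.join ['\n'] (l' :: rest) : List Char) ≠ [] := by simp
        rw [List.append_assoc, List.getLast?_append_of_ne_nil _ h1,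
          List.getLast?_append_of_ne_nil _ hjne]
        exact hd'

theorem pvComposeAB {bu : List Char} {ls : List (List Char)} (h : ∀ l ∈ ls, pvGood l) :
    pvComposeA bu ls = pvComposeB bu ls := by
  cases ls with
  | nil => rfl
  | cons l t =>
    simp only [pvComposeA, pvComposeB,
      pvStrip_noop (pvJoin_good (l :: t) (by simp) h)]

theorem pvJoin_len : ∀ (ls : List (List Char)), ls ≠ [] →
    (PySem.Chars.join ['\n'] ls).length + 1 = (ls.map (fun l => l.length)).sum + ls.length := by
  intro ls
  induction ls with
  | nil => intro h; exact absurd rfl h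
  | cons l t ih =>
    intro _
    cases t with
    | nil => simp [PySem.Chars.join_singleton]
    | cons l' r =>
      rw [PySem.Chars.join_cons_cons]
      have := ih (by simp)
      simp only [List.length_append, List.map_cons, List.sum_cons, List.length_cons,
        List.length_nil] at *
      omega

theorem pvComposeB_len (bu : List Char) (ls : List (List Char)) (h : ls ≠ []) :
    ((pvComposeB bu ls).length : Int) =
      ((pvHeader.length : Int) + 1 + ("\n\nYou: ".toList.length : Int) + (bu.length : Int) + ("\nOrion:".toList.length : Int))
      + (((ls.map (fun l => l.length)).sum : Nat) : Int) + (ls.length : Int) - 1 := by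
  have h2 : ((PySem.Chars.join ['\n'] ls).length : Int) + 1
      = (((ls.map (fun l => l.length)).sum : Nat) : Int) + (ls.length : Int) := by
    exact_mod_cast pvJoin_len ls h
  simp only [pvComposeB, List.length_append, List.length_cons]
  push_cast at h2 ⊢
  omega

theorem pvTrim_eq (bu : List Char) (mc : Int) :
    ∀ ls : List (List Char), (∀ l ∈ ls, pvGood l) →
    ∀ cur : Int, (ls ≠ [] → cur = ((pvComposeB bu ls).length : Int)) →
    pvTrimA bu mc ls = pvComposeB bu (pvTrimB mc cur ls) := by
  intro ls
  induction ls with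
  | nil =>
    intro _ cur _
    simp only [pvTrimA, pvTrimB]
    exact pvComposeAB (by simp)
  | cons l t ih =>
    intro hgood cur hcur
    have hc : cur = ((pvComposeB bu (l :: t)).length : Int) := hcur (by simp)
    have hAB : pvComposeA bu (l :: t) = pvComposeB bu (l :: t) := pvComposeAB hgood
    simp only [pvTrimA, pvTrimB, hAB, ← hc]
    by_cases hlt : mc < cur
    · rw [if_pos hlt, if_pos hlt]
      refine ih (fun x hx => hgood x (by simp [hx])) _ ?_
      intro ht
      rw [if_neg ht]
      have h1 := pvComposeB_len bu (l :: t) (by simp)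
      have h2 := pvComposeB_len bu t ht
      rw [hc, h1, h2]
      simp only [List.map_cons, List.sum_cons, List.length_cons]
      push_cast
      omega
    · rw [if_neg hlt, if_neg hlt]

-- ===== VERDICT (by name: the statement is the Claim_ definition above) =====
theorem build_prompt_with_history_py_spec : Claim_equal_build_prompt_with_history_py := by
  intro history user_text turns max_chars _
  unfold Spec_build_prompt_with_history_py
  unfold build_prompt_with_history_py build_prompt_with_history_py_alt
  simp only [pvFoldA_eq, List.nil_append]
  set tail := (if turns ≠ 0 then PySem.List.slice (history.filter pvIsUA) (some (-(2 * max 0 turns))) none else []) with htail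
  set lines := tail.filterMap pvLineOf with hlines
  have hgood : ∀ l ∈ lines, pvGood l := by
    intro l hl
    rw [hlines, List.mem_filterMap] at hl
    obtain ⟨m, -, hm⟩ := hl
    exact pvLineOf_good hm
  set bu := PySem.Chars.strip user_text.toList with hbu
  by_cases hln : lines = []
  · simp [hln]
  · simp only [if_neg hln]
    by_cases hmc : 0 < max_chars
    · have hne : max_chars ≠ 0 ∧ 0 < max_chars := ⟨by omega, hmc⟩
      simp only [if_pos hne, if_pos hmc]
      congr 1
      refine pvTrim_eq bu max_chars lines hgood _ ?_
      intro _
      rw [pvComposeB_len bu lines hln]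
    · have hne : ¬ (max_chars ≠ 0 ∧ 0 < max_chars) := by tauto
      simp only [if_neg hne, if_neg hmc]
      congr 1
      exact pvComposeAB hgood
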